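-- pv_equiv track=rewrite | github.com/asvimalraj2005/Data_Structure_Module_1 | MathModularArithmetic/Problem4.py | MaxGCDofanArrayByDeletingOnebyOne
-- ===== SOURCE A (Python) =====
-- def GCD(A,B):
--     if B==0:
--         return A
--     else:
--         return GCD(B,A%B)
--
-- def MaxGCDofanArrayByDeletingOnebyOne(A):               # Ain't a good code function name but it nevertheless enough
--     max_gcd=0
--     N=len(A)
--
--     for i in range(N):                                  # Outer Loop for every i the element is removed
--         temp=A[:i]+A[i+1:]                               # The i th element is removed here and element is stored inside the temp list so that it will not modify the original list
--         g=temp[0]                                       # Storing the first element in temp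
--         for j in range(1,len(temp)):                    # For every i iteration , j will iterate from 0 to N-1 of the array
--             g=GCD(g,temp[j])                            # Calculating the GCD
--         max_gcd=max(max_gcd,g)                          # Max GCD after every element got removed and calculated
--     return max_gcd
-- ===== SOURCE B (Python) =====
-- def _gcd2(a, b):
--     while b != 0:
--         a, b = b, a % b
--     return a
--
-- def MaxGCDofanArrayByDeletingOnebyOne(A):
--     n = len(A)
--     suf = [0] * (n + 1)                      # suf[i] = gcd of A[i:], 0 for the empty tail
--     for i in range(n - 1, -1, -1):
--         suf[i] = _gcd2(A[i], suf[i + 1])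
--     best = 0
--     left = 0                                 # gcd of A[:i], 0 for the empty prefix
--     for i, x in enumerate(A):
--         best = max(best, _gcd2(left, suf[i + 1]))
--         left = _gcd2(left, x)
--     return best
-- ===== Notes on version B (the rewrite author's own statement) =====
-- stated objective: faster
-- what changed: Replaces the remove-one-then-rescan nested loops (O(N^2) gcd steps) by a suffix-gcd array plus a running prefix-gcd accumulator, combining the two sides in O(1) per deleted index.
import Mathlib
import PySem

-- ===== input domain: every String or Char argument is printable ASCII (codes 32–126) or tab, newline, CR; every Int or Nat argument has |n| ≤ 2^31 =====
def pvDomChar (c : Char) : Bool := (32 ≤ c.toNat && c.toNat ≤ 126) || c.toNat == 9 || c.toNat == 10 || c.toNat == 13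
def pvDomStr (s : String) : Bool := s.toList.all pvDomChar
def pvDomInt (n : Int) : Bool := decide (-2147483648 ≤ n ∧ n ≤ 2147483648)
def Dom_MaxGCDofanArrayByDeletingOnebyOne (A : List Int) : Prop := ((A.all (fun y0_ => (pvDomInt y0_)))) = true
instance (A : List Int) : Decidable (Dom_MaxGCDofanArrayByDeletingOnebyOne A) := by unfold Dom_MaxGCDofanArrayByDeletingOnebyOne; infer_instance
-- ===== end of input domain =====

-- B replaces A's delete-one-then-rescan nested loops by a suffix-gcd array plus a running prefix gcd;
-- equivalence is about the return value (neither program mutates its argument).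

-- ===== PORT A =====
-- A's helper GCD (recursive Euclid with Python's floor mod); fuel |b|+1 only makes the
-- recursion structural — it is always sufficient (GCD_unfold below is the exact Python equation).
def GCDfuel : Nat → Int → Int → Int
  | 0, a, _ => a
  | f + 1, a, b => if b = 0 then a else GCDfuel f b (PySem.Int.mod a b)

def GCD (a b : Int) : Int := GCDfuel (b.natAbs + 1) a b

def MaxGCDofanArrayByDeletingOnebyOne (A : List Int) : Int :=
  let N : Int := A.length
  (PySem.List.pyRange 0 N 1).foldl (fun max_gcd i =>
    let temp := PySem.List.slice A none (some i) ++ PySem.List.slice A (some (i + 1)) none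
    let g0 := PySem.List.pyGetD temp 0 0          -- temp[0]; in range except when len(A) = 1 (excluded by Pre_)
    let g := (PySem.List.pyRange 1 (temp.length : Int) 1).foldl
      (fun g j => GCD g (PySem.List.pyGetD temp j 0)) g0
    max max_gcd g) 0

-- ===== PORT B =====
-- B's helper _gcd2: the same Euclid step as a while loop (same fuel device)
def gcd2fuel : Nat → Int → Int → Int
  | 0, a, _ => a
  | f + 1, a, b => if b = 0 then a else gcd2fuel f b (PySem.Int.mod a b)

def gcd2 (a b : Int) : Int := gcd2fuel (b.natAbs + 1) a b

def MaxGCDofanArrayByDeletingOnebyOne_alt (A : List Int) : Int :=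
  -- suf[i] = gcd of A[i:], filled right to left (0 for the empty tail)
  let suf := A.foldr (fun x s => gcd2 x (s.headD 0) :: s) [0]
  -- one left-to-right pass: best so far, running prefix gcd
  ((PySem.List.enumerate A 0).foldl
    (fun (st : Int × Int) p =>
      (max st.1 (gcd2 st.2 (PySem.List.pyGetD suf (p.1 + 1) 0)), gcd2 st.2 p.2))
    (0, 0)).1

-- ===== PRECONDITION & SPEC =====
-- Pre_ excludes exactly the single-element lists, on which Python A raises IndexError (temp[0] of the empty remainder).
def Pre_MaxGCDofanArrayByDeletingOnebyOne (A : List Int) : Prop := A.length ≠ 1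
instance (A : List Int) : Decidable (Pre_MaxGCDofanArrayByDeletingOnebyOne A) := by
  unfold Pre_MaxGCDofanArrayByDeletingOnebyOne; infer_instance

def pvWitness_MaxGCDofanArrayByDeletingOnebyOne : List Int := [4, 6, 8]

def Spec_MaxGCDofanArrayByDeletingOnebyOne (A : List Int) (out : Int) : Prop :=
  out = MaxGCDofanArrayByDeletingOnebyOne_alt A
instance (A : List Int) (out : Int) : Decidable (Spec_MaxGCDofanArrayByDeletingOnebyOne A out) := by
  unfold Spec_MaxGCDofanArrayByDeletingOnebyOne; infer_instance

-- ===== CLAIM (what is proved, stated in full; the proofs are below) =====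
def Claim_equal_MaxGCDofanArrayByDeletingOnebyOne : Prop :=
  ∀ (A : List Int), Dom_MaxGCDofanArrayByDeletingOnebyOne A →
    Pre_MaxGCDofanArrayByDeletingOnebyOne A →
    Spec_MaxGCDofanArrayByDeletingOnebyOne A (MaxGCDofanArrayByDeletingOnebyOne A)

-- ===== LEMMAS AND PROOFS =====

theorem pyMod_natAbs_lt (a b : Int) (hb : b ≠ 0) :
    (PySem.Int.mod a b).natAbs < b.natAbs := by
  rcases lt_or_gt_of_ne hb with h | h
  · have h1 := (PySem.Int.mod_neg_bounds a h).1
    have h2 := (PySem.Int.mod_neg_bounds a h).2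
    omega
  · have h1 := PySem.Int.mod_nonneg a h
    have h2 := PySem.Int.mod_lt a h
    omega

theorem GCDfuel_congr : ∀ (f g : Nat) (a b : Int), b.natAbs < f → b.natAbs < g →
    GCDfuel f a b = GCDfuel g a b := by
  intro f
  induction f with
  | zero => intro g a b hf; omega
  | succ f ih =>
    intro g a b hf hg
    cases g with
    | zero => omega
    | succ g =>
      simp only [GCDfuel]
      by_cases hb : b = 0
      · simp [hb]
      · simp only [hb, if_false]
        exact ih g b _ (by have := pyMod_natAbs_lt a b hb; omega)
          (by have := pyMod_natAbs_lt a b hb; omega)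

theorem GCD_unfold (a b : Int) : GCD a b = if b = 0 then a else GCD b (PySem.Int.mod a b) := by
  by_cases hb : b = 0
  · simp [GCD, GCDfuel, hb]
  · simp only [GCD, GCDfuel, hb, if_false]
    exact GCDfuel_congr _ _ b _ (pyMod_natAbs_lt a b hb) (Nat.lt_succ_self _)

theorem GCD_zero_right (a : Int) : GCD a 0 = a := by simp [GCD, GCDfuel]

theorem GCD_eq_sign_mul_gcd : ∀ (a b : Int), b ≠ 0 → GCD a b = b.sign * (Int.gcd a b : Int) := by
  suffices H : ∀ (n : Nat) (a b : Int), b.natAbs ≤ n → b ≠ 0 →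
      GCD a b = b.sign * (Int.gcd a b : Int) by
    intro a b hb; exact H b.natAbs a b le_rfl hb
  intro n
  induction n with
  | zero => intro a b h hb; omega
  | succ n ih =>
    intro a b h hb
    rw [GCD_unfold, if_neg hb]
    by_cases hr : PySem.Int.mod a b = 0
    · rw [hr, GCD_zero_right]
      have hd : b ∣ a := (PySem.Int.mod_eq_zero_iff_dvd a b).1 hr
      rw [Int.gcd_eq_natAbs_right_iff_dvd.mpr hd]
      exact (Int.sign_mul_natAbs b).symm
    · have hlt : (PySem.Int.mod a b).natAbs < b.natAbs := pyMod_natAbs_lt a b hb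
      rw [ih b _ (by omega) hr]
      have hsign : (PySem.Int.mod a b).sign = b.sign := by
        rcases lt_or_gt_of_ne hb with hneg | hpos
        · have h1 := (PySem.Int.mod_neg_bounds a hneg).2
          have : PySem.Int.mod a b < 0 := lt_of_le_of_ne h1 hr
          rw [Int.sign_eq_neg_one_of_neg this, Int.sign_eq_neg_one_of_neg hneg]
        · have h1 := PySem.Int.mod_nonneg a hpos
          have : 0 < PySem.Int.mod a b := lt_of_le_of_ne h1 (Ne.symm hr)
          rw [Int.sign_eq_one_of_pos this, Int.sign_eq_one_of_pos hpos]
      have hg : Int.gcd b (PySem.Int.mod a b) = Int.gcd a b := by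
        have hrep : PySem.Int.mod a b = a - PySem.Int.floordiv a b * b := by
          have := PySem.Int.floordiv_mul_add_mod a b; omega
        rw [hrep, mul_comm, Int.gcd_sub_mul_left_right b a (PySem.Int.floordiv a b), Int.gcd_comm]
      rw [hsign, hg]

theorem GCD_zero_left (a : Int) : GCD 0 a = a := by
  by_cases ha : a = 0
  · simp [ha, GCD_zero_right]
  · rw [GCD_eq_sign_mul_gcd 0 a ha, Int.gcd_zero_left]
    exact Int.sign_mul_natAbs a

theorem GCD_natAbs (a b : Int) : (GCD a b).natAbs = Int.gcd a b := by
  by_cases hb : b = 0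
  · simp [hb, GCD_zero_right, Int.gcd]
  · rw [GCD_eq_sign_mul_gcd a b hb, Int.natAbs_mul, Int.natAbs_sign]
    simp [hb]

theorem GCD_assoc (a b c : Int) : GCD (GCD a b) c = GCD a (GCD b c) := by
  by_cases hc : c = 0
  · simp [hc, GCD_zero_right]
  · have hbc : GCD b c ≠ 0 := by
      intro h0
      have hna := GCD_natAbs b c
      rw [h0] at hna
      simp only [Int.natAbs_zero] at hna
      exact hc (Int.gcd_eq_zero_iff.mp hna.symm).2
    rw [GCD_eq_sign_mul_gcd _ c hc, GCD_eq_sign_mul_gcd a _ hbc]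
    have hs : (GCD b c).sign = c.sign := by
      rw [GCD_eq_sign_mul_gcd b c hc, Int.sign_mul, Int.sign_sign]
      have : (0 : Int) < (Int.gcd b c : Int) := by
        have : Int.gcd b c ≠ 0 := fun h => hc (Int.gcd_eq_zero_iff.mp h).2
        exact_mod_cast Nat.pos_of_ne_zero this
      rw [Int.sign_eq_one_of_pos this, mul_one]
    rw [hs]
    congr 1
    -- |gcd| parts: Nat.gcd associativity through natAbs
    have h1 : Int.gcd (GCD a b) c = Nat.gcd (Int.gcd a b) c.natAbs := by
      rw [Int.gcd, GCD_natAbs]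
    have h2 : Int.gcd a (GCD b c) = Nat.gcd a.natAbs (Int.gcd b c) := by
      rw [Int.gcd, GCD_natAbs]
    rw [h1, h2]
    norm_cast
    rw [Int.gcd, Int.gcd]
    exact Nat.gcd_assoc _ _ _

theorem gcd2fuel_eq_GCDfuel : ∀ (f : Nat) (a b : Int), gcd2fuel f a b = GCDfuel f a b := by
  intro f
  induction f with
  | zero => intro a b; rfl
  | succ f ih => intro a b; simp only [gcd2fuel, GCDfuel, ih]

theorem gcd2_eq_GCD (a b : Int) : gcd2 a b = GCD a b := gcd2fuel_eq_GCDfuel _ a b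

-- prefix gcd of A[:k] and suffix gcd of A[k:]
def Pgcd (A : List Int) (k : Nat) : Int := (A.take k).foldl GCD 0
def Sgcd (A : List Int) (k : Nat) : Int := (A.drop k).foldr GCD 0

theorem foldl_GCD_eq_GCD_foldr (l : List Int) (g : Int) :
    l.foldl GCD g = GCD g (l.foldr GCD 0) := by
  induction l generalizing g with
  | nil => simpa using (GCD_zero_right g).symm
  | cons x t ih => simp only [List.foldl_cons, List.foldr_cons, ih (GCD g x), GCD_assoc]

-- the common reference value: max over k of gcd(A[:k]) ∘ gcd(A[k+1:])
theorem sliceA_take (A : List Int) (k : Nat) :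
    PySem.List.slice A none (some (k : Int)) = A.take k := by
  rw [PySem.List.slice_to A (by positivity)]; simp

theorem sliceA_drop (A : List Int) (k : Nat) :
    PySem.List.slice A (some ((k : Int) + 1)) none = A.drop (k + 1) := by
  rw [show ((k : Int) + 1) = (((k + 1 : Nat)) : Int) by push_cast; ring,
    PySem.List.slice_from A (by positivity)]
  simp

theorem inner_fold (l : List Int) :
    (PySem.List.pyRange 1 (l.length : Int) 1).foldl
      (fun g j => GCD g (PySem.List.pyGetD l j 0)) (PySem.List.pyGetD l 0 0)
      = l.foldl GCD 0 := by
  rw [PySem.List.foldl_pyRange_pyGetD' l 0 GCD _ (by norm_num), PySem.List.pyGetD_zero]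
  norm_num
  cases l with
  | nil => simp
  | cons x t => simp [GCD_zero_left]

theorem bodyA_eq (A : List Int) (k : Nat) (m : Int) :
    (fun max_gcd i =>
      let temp := PySem.List.slice A none (some i) ++ PySem.List.slice A (some (i + 1)) none
      let g0 := PySem.List.pyGetD temp 0 0
      let g := (PySem.List.pyRange 1 (temp.length : Int) 1).foldl
        (fun g j => GCD g (PySem.List.pyGetD temp j 0)) g0
      max max_gcd g) m (k : Int)
      = max m (GCD (Pgcd A k) (Sgcd A (k + 1))) := by
  simp only [sliceA_take, sliceA_drop, inner_fold]
  rw [List.foldl_append, foldl_GCD_eq_GCD_foldr]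
  rfl

theorem A_eq_ref (A : List Int) :
    MaxGCDofanArrayByDeletingOnebyOne A =
      (List.range A.length).foldl (fun m k => max m (GCD (Pgcd A k) (Sgcd A (k + 1)))) 0 := by
  simp only [MaxGCDofanArrayByDeletingOnebyOne]
  rw [PySem.List.pyRange_one]
  simp only [Int.sub_zero, Int.toNat_natCast, List.foldl_map, zero_add]
  refine List.foldl_ext _ _ 0 ?_
  intro m k _
  exact bodyA_eq A k m

def sufList (A : List Int) : List Int := A.foldr (fun x s => gcd2 x (s.headD 0) :: s) [0]

theorem sufList_eq (A : List Int) :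
    sufList A = (List.range (A.length + 1)).map (fun k => Sgcd A k) := by
  induction A with
  | nil => simp [sufList, Sgcd]
  | cons x t ih =>
    have hhead : (sufList t).headD 0 = Sgcd t 0 := by
      rw [ih, List.range_succ_eq_map]; simp
    show gcd2 x ((sufList t).headD 0) :: sufList t = _
    rw [hhead, gcd2_eq_GCD,
      show (x :: t).length + 1 = (t.length + 1) + 1 by simp,
      List.range_succ_eq_map, List.range_succ_eq_map]
    rw [ih, List.range_succ_eq_map]
    simp only [List.map_cons, List.map_map]
    rfl

theorem Bloop (A : List Int) : ∀ (n k : Nat) (best : Int), k + n = A.length →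
    ((PySem.List.enumerate (A.drop k) (k : Int)).foldl
      (fun (st : Int × Int) p =>
        (max st.1 (gcd2 st.2 (PySem.List.pyGetD (sufList A) (p.1 + 1) 0)), gcd2 st.2 p.2))
      (best, Pgcd A k)).1
    = (List.range' k n).foldl (fun m j => max m (GCD (Pgcd A j) (Sgcd A (j + 1)))) best := by
  intro n
  induction n with
  | zero =>
    intro k best hk
    have hnil : A.drop k = [] := List.drop_eq_nil_iff.mpr (by omega)
    simp [hnil, PySem.List.enumerate_nil]
  | succ n ih =>
    intro k best hk
    have hklt : k < A.length := by omega
    rw [List.drop_eq_getElem_cons hklt, PySem.List.enumerate_cons, List.foldl_cons]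
    have hidx : PySem.List.pyGetD (sufList A) ((k : Int) + 1) 0 = Sgcd A (k + 1) := by
      rw [show ((k : Int) + 1) = (((k + 1 : Nat)) : Int) by push_cast; ring,
        PySem.List.pyGetD_natCast, sufList_eq]
      exact PySem.List.getD_map_range _ _ _ _ (by omega)
    have hleft : gcd2 (Pgcd A k) A[k] = Pgcd A (k + 1) := by
      rw [gcd2_eq_GCD]
      unfold Pgcd
      rw [List.take_succ_eq_append_getElem hklt, List.foldl_append]
      simp
    rw [hidx, hleft, gcd2_eq_GCD,
      show ((k : Int) + 1) = (((k + 1 : Nat)) : Int) by push_cast; ring,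
      List.range'_succ, List.foldl_cons]
    exact ih (k + 1) (max best (GCD (Pgcd A k) (Sgcd A (k + 1)))) (by omega)

theorem B_eq_ref (A : List Int) :
    MaxGCDofanArrayByDeletingOnebyOne_alt A =
      (List.range A.length).foldl (fun m k => max m (GCD (Pgcd A k) (Sgcd A (k + 1)))) 0 := by
  have h := Bloop A A.length 0 0 (by omega)
  simp only [List.drop_zero, Int.natCast_zero] at h
  simp only [MaxGCDofanArrayByDeletingOnebyOne_alt]
  rw [List.range_eq_range']
  exact h

-- ===== VERDICT (by name: the statement is the Claim_ definition above) =====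
theorem MaxGCDofanArrayByDeletingOnebyOne_spec : Claim_equal_MaxGCDofanArrayByDeletingOnebyOne := by
  intro A _ _
  unfold Spec_MaxGCDofanArrayByDeletingOnebyOne
  rw [A_eq_ref, B_eq_ref]
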